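-- pv_equiv track=rewrite | github.com/pypi-data/pypi-mirror-71 | packages/phylogenetic-features/phylogenetic_features-0.1-py3-none-any.whl/phylogenetic/features.py | diversidadePura
-- ===== SOURCE A (Python) =====
-- WEIGTH = 2
--
-- def diversidadePura(hist):  # ok
--     """Esta função retorna o indice de diversidade pura (DD) da imagem"""
--
--     num_especies = len(hist)
--     # acumula a soma entre as distances de especies i e j
--     summation = 0
--
--     for i in range(num_especies):
--         if hist[i] == 0:
--             continue
--         minimun = 9999999
--         for j in range(num_especies):
--             if hist[j] == 0:
--                 continue
--
--             if i == j:
--                 continue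
--
--             if j == 0:
--                 distance = WEIGTH*((j - i) + 1)
--             elif j < i:
--                 distance = WEIGTH*((i - j) + 2)
--             else:
--                 distance = WEIGTH*((j - i) + 2)
--
--             if distance < minimun:
--                 minimun = distance
--
--         summation += minimun
--
--     return summation
-- ===== SOURCE B (Python) =====
-- def diversidadePura(hist):
--     """O(n) re-implementation: only the nearest nonzero neighbours of i (and the
--     special j==0 bin) can realise the inner minimum, so scan the nonzero indices once."""
--     nz = [i for i, v in enumerate(hist) if v != 0]
--     first = nz[0] if nz else None
--     total = 0
--     prev = None
--     for i, nxt in zip(nz, nz[1:] + [None]):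
--         best = 9999999
--         if first == 0 and i != 0:
--             best = min(best, 2 * (1 - i))
--         if prev is not None and prev != 0:
--             best = min(best, 2 * (i - prev + 2))
--         if nxt is not None:
--             best = min(best, 2 * (nxt - i + 2))
--         total += best
--         prev = i
--     return total
-- ===== Notes on version B (the rewrite author's own statement) =====
-- stated objective: faster
-- what changed: B replaces A's quadratic all-pairs inner scan with a single pass over the list of nonzero indices, where for each index only the nearest nonzero neighbour on each side (plus the special bin 0, whose distance formula is different) can realise the minimum, so each bin is handled in O(1).
import Mathlib
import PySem

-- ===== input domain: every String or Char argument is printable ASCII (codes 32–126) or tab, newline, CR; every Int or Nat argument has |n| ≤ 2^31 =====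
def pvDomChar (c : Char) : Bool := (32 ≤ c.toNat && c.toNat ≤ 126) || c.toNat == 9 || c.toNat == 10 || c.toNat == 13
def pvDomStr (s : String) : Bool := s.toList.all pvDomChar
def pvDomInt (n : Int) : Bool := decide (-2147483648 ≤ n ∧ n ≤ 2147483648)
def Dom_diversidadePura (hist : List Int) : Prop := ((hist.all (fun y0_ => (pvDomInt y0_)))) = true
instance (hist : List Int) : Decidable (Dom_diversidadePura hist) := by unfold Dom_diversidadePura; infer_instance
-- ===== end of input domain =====

-- B replaces A's quadratic all-pairs inner scan by one pass over the nonzero indices,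
-- taking only the nearest nonzero neighbours (and the special bin 0) as candidates.

-- ===== PORT A =====
def WEIGTH : Int := 2

def diversidadePura (hist : List Int) : Int :=
  let num_especies := PySem.List.len hist
  (PySem.List.pyRange 0 num_especies 1).foldl (fun summation i =>
    if PySem.List.pyGetD hist i 0 = 0 then summation
    else
      summation + (PySem.List.pyRange 0 num_especies 1).foldl (fun minimun j =>
        if PySem.List.pyGetD hist j 0 = 0 then minimun
        else if j = i then minimun
        else
          let distance := if j = 0 then WEIGTH*((j - i) + 1)
            else if j < i then WEIGTH*((i - j) + 2)
            else WEIGTH*((j - i) + 2)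
          if distance < minimun then distance else minimun) 9999999) 0

-- ===== PORT B =====
-- best value for one loop iteration of Source B: sequential min-updates over the candidates
def pvBestB (first : Option Int) (prev : Option Int) (i : Int) (nxt : Option Int) : Int :=
  let b1 : Int := 9999999
  let b2 := if first = some 0 ∧ i ≠ 0 then min b1 (2 * (1 - i)) else b1
  let b3 := match prev with
    | some p => if p ≠ 0 then min b2 (2 * (i - p + 2)) else b2
    | none => b2
  match nxt with
  | some j => min b3 (2 * (j - i + 2))
  | none => b3

-- the 'for i, nxt in zip(nz, nz[1:]+[None])' loop with accumulator prev
def pvAltGo (first : Option Int) : Option Int → List Int → Int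
  | _, [] => 0
  | prev, i :: rest => pvBestB first prev i rest.head? + pvAltGo first (some i) rest

def diversidadePura_alt (hist : List Int) : Int :=
  let nz := ((PySem.List.enumerate hist 0).filter (fun p => !(p.2 == 0))).map (fun p => p.1)
  pvAltGo nz.head? none nz

-- ===== PRECONDITION & SPEC =====
def Spec_diversidadePura (hist : List Int) (out : Int) : Prop := out = diversidadePura_alt hist
instance (hist : List Int) (out : Int) : Decidable (Spec_diversidadePura hist out) := by unfold Spec_diversidadePura; infer_instance

-- ===== CLAIM (what is proved, stated in full; the proofs are below) =====
def Claim_equal_diversidadePura : Prop := ∀ (hist : List Int), Dom_diversidadePura hist → Spec_diversidadePura hist (diversidadePura hist)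

-- ===== LEMMAS AND PROOFS =====

-- A's distance formula for a pair (i, j)
def pvDist (i j : Int) : Int :=
  if j = 0 then WEIGTH * ((j - i) + 1)
  else if j < i then WEIGTH * ((i - j) + 2)
  else WEIGTH * ((j - i) + 2)

-- the nonzero indices, as A reaches them
def pvNz (hist : List Int) : List Int :=
  (PySem.List.pyRange 0 (PySem.List.len hist) 1).filter (fun j => !(PySem.List.pyGetD hist j 0 == 0))

-- A's inner-loop value at i, as a min-fold over the other nonzero indices
def pvInner (hist : List Int) (i : Int) : Int :=
  (((pvNz hist).filter (fun j => !(j == i))).map (pvDist i)).foldl min 9999999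

theorem pv_if_lt_eq_min (m d : Int) : (if d < m then d else m) = min m d := by
  rw [min_def]; split_ifs <;> omega

-- the loop body of A's inner loop, as a min-update
def pvFmin (hist : List Int) (i : Int) (m j : Int) : Int :=
  if PySem.List.pyGetD hist j 0 = 0 then m
  else if j = i then m
  else min m (pvDist i j)

theorem pv_inner_body_eq (hist : List Int) (i : Int) :
    (fun minimun j =>
      if PySem.List.pyGetD hist j 0 = 0 then minimun
      else if j = i then minimun
      else
        let distance := if j = 0 then WEIGTH*((j - i) + 1)
          else if j < i then WEIGTH*((i - j) + 2)
          else WEIGTH*((j - i) + 2)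
        if distance < minimun then distance else minimun)
    = pvFmin hist i := by
  funext m j
  simp only [pvFmin, pvDist, pv_if_lt_eq_min]

theorem pv_inner_fold (hist : List Int) (i : Int) :
    ∀ (l : List Int) (a : Int),
      l.foldl (pvFmin hist i) a
      = (((l.filter (fun j => !(PySem.List.pyGetD hist j 0 == 0))).filter
            (fun j => !(j == i))).map (pvDist i)).foldl min a := by
  intro l
  induction l with
  | nil => intro a; rfl
  | cons x t ih =>
    intro a
    rw [List.foldl_cons, ih]
    by_cases hx : PySem.List.pyGetD hist x 0 = 0
    · simp [pvFmin, hx]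
    · by_cases hxi : x = i
      · simp [pvFmin, hxi]
      · simp [pvFmin, hx, hxi]

-- A's outer foldl is the sum of the inner values over the nonzero indices
theorem pv_outer_fold (hist : List Int) :
    ∀ (l : List Int) (a : Int),
      l.foldl (fun summation i =>
        if PySem.List.pyGetD hist i 0 = 0 then summation
        else summation + pvInner hist i) a
      = a + ((l.filter (fun j => !(PySem.List.pyGetD hist j 0 == 0))).map (pvInner hist)).sum := by
  intro l
  induction l with
  | nil => intro a; simp
  | cons x t ih =>
    intro a
    rw [List.foldl_cons]
    by_cases hx : PySem.List.pyGetD hist x 0 = 0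
    · rw [if_pos hx, ih]; simp [hx]
    · rw [if_neg hx, ih]; simp [hx]; ring

-- fold-min equality from mutual domination
theorem pv_foldl_min_eq (a : Int) (C D : List Int)
    (h1 : ∀ y ∈ C, y ∈ D) (h2 : ∀ z ∈ D, ∃ y ∈ C, y ≤ z) :
    D.foldl min a = C.foldl min a := by
  apply le_antisymm
  · rcases PySem.List.foldl_min_mem C a with h | h
    · rw [h]; exact (PySem.List.foldl_min_le D a).1
    · exact (PySem.List.foldl_min_le D a).2 _ (h1 _ h)
  · rcases PySem.List.foldl_min_mem D a with h | h
    · rw [h]; exact (PySem.List.foldl_min_le C a).1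
    · obtain ⟨y, hy, hle⟩ := h2 _ h
      exact le_trans ((PySem.List.foldl_min_le C a).2 _ hy) (by omega)

-- pairwise-< heads/lasts bound the members
theorem pv_head_le (x h : Int) (t : List Int)
    (hpw : (h :: t).Pairwise (· < ·)) (hx : x ∈ h :: t) : h ≤ x := by
  rcases List.mem_cons.1 hx with rfl | hx
  · exact le_refl x
  · exact le_of_lt ((List.pairwise_cons.1 hpw).1 x hx)

theorem pv_le_getLast (x : Int) : ∀ (l : List Int), l.Pairwise (· < ·) → x ∈ l →
    ∀ p, l.getLast? = some p → x ≤ p := by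
  intro l
  induction l with
  | nil => intro _ hx; cases hx
  | cons h t ih =>
    intro hpw hx p hp
    cases t with
    | nil => simp at hp hx; omega
    | cons b u =>
      rw [List.getLast?_cons_cons] at hp
      rcases List.mem_cons.1 hx with rfl | hx
      · have hpmem : p ∈ b :: u := List.mem_of_getLast? hp
        exact le_of_lt ((List.pairwise_cons.1 hpw).1 p hpmem)
      · exact ih (List.pairwise_cons.1 hpw).2 hx p hp

-- B's candidates, as a list (bestB is their left-to-right min-fold)
def pvCand (first prev : Option Int) (i : Int) (nxt : Option Int) : List Int :=
  (if first = some 0 ∧ i ≠ 0 then [2 * (1 - i)] else []) ++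
  (match prev with | some p => if p ≠ 0 then [2 * (i - p + 2)] else [] | none => []) ++
  (match nxt with | some j => [2 * (j - i + 2)] | none => [])

theorem pvBestB_eq_fold (f p n : Option Int) (i : Int) :
    pvBestB f p i n = (pvCand f p i n).foldl min 9999999 := by
  rcases p with _ | p <;> rcases n with _ | n <;>
    simp only [pvBestB, pvCand] <;> split_ifs <;> simp [min_assoc]

-- the key per-element lemma: B's candidate minimum is A's full inner minimum
theorem pv_best_eq_inner (P R : List Int) (i : Int)
    (hpw : (P ++ i :: R).Pairwise (· < ·)) (hnn : ∀ x ∈ P ++ i :: R, 0 ≤ x) :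
    pvBestB (P ++ i :: R).head? P.getLast? i R.head?
      = ((P ++ R).map (pvDist i)).foldl min 9999999 := by
  rw [List.pairwise_append] at hpw
  obtain ⟨hP, hiR', hcross⟩ := hpw
  have hPi : ∀ a ∈ P, a < i := fun a ha => hcross a ha i (List.mem_cons_self ..)
  have hiR : ∀ b ∈ R, i < b := (List.pairwise_cons.1 hiR').1
  have hnnP : ∀ x ∈ P, 0 ≤ x := fun x hx => hnn x (List.mem_append_left _ hx)
  have hnni : 0 ≤ i := hnn i (List.mem_append_right _ (List.mem_cons_self ..))
  rw [pvBestB_eq_fold]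
  refine (pv_foldl_min_eq _ _ _ ?_ ?_).symm
  · -- every candidate is one of A's distances
    intro y hy
    simp only [pvCand, List.mem_append] at hy
    rcases hy with (hy | hy) | hy
    · -- first == 0 candidate
      split_ifs at hy with hc
      · obtain ⟨hf, hi0⟩ := hc
        simp only [List.mem_singleton] at hy
        cases P with
        | nil => simp at hf; omega
        | cons p0 P' =>
          have hp0 : p0 = 0 := by simpa using hf
          refine List.mem_map.2 ⟨0, List.mem_append_left _ (by simp [← hp0]), ?_⟩
          simp [pvDist, WEIGTH, hy]; ring
      · cases hy
    · -- prev candidate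
      rcases hq : P.getLast? with _ | q
      · simp [hq] at hy
      · rw [hq] at hy
        by_cases hq0 : q = 0
        · simp [hq0] at hy
        · simp [hq0] at hy
          have hqm : q ∈ P := List.mem_of_getLast? hq
          refine List.mem_map.2 ⟨q, List.mem_append_left _ hqm, ?_⟩
          have hqi : q < i := hPi q hqm
          simp [pvDist, hq0, hqi, WEIGTH, hy]
    · -- next candidate
      cases R with
      | nil => simp at hy
      | cons r0 R' =>
        simp only [List.head?_cons, List.mem_singleton] at hy
        have hr : i < r0 := hiR r0 (List.mem_cons_self ..)
        refine List.mem_map.2 ⟨r0, List.mem_append_right _ (List.mem_cons_self ..), ?_⟩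
        have h0 : ¬ r0 = 0 := by omega
        have h1 : ¬ r0 < i := by omega
        simp [pvDist, h0, h1, WEIGTH, hy]
  · -- every distance is dominated by some candidate
    intro z hz
    obtain ⟨x, hx, rfl⟩ := List.mem_map.1 hz
    rcases List.mem_append.1 hx with hxP | hxR
    · by_cases hx0 : x = 0
      · -- x = 0: the first-bin candidate applies
        subst hx0
        cases P with
        | nil => cases hxP
        | cons p0 P' =>
          have hp0le : p0 ≤ 0 := pv_head_le 0 p0 P' hP hxP
          have hp00 : p0 = 0 := le_antisymm hp0le (hnnP p0 (List.mem_cons_self ..))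
          have hi0 : i ≠ 0 := by have := hPi 0 hxP; omega
          refine ⟨2 * (1 - i), ?_, ?_⟩
          · simp [pvCand, hp00, hi0]
          · simp [pvDist, WEIGTH]
      · -- x ≠ 0: the prev candidate applies
        have hPne : P ≠ [] := by rintro rfl; cases hxP
        obtain ⟨q, hq⟩ : ∃ q, P.getLast? = some q := by
          cases P with
          | nil => exact absurd rfl hPne
          | cons a b => exact ⟨(a :: b).getLast (by simp), List.getLast?_eq_some_getLast (by simp)⟩
        have hxq : x ≤ q := pv_le_getLast x P hP hxP q hq
        have hxpos : 0 < x := lt_of_le_of_ne (hnnP x hxP) (Ne.symm hx0)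
        have hq0 : q ≠ 0 := by omega
        refine ⟨2 * (i - q + 2), ?_, ?_⟩
        · simp [pvCand, hq, hq0]
        · have hxi : x < i := hPi x hxP
          simp [pvDist, hx0, hxi, WEIGTH]
          omega
    · -- x ∈ R: the next candidate applies
      cases R with
      | nil => cases hxR
      | cons r0 R' =>
        have hR : (r0 :: R').Pairwise (· < ·) := (List.pairwise_cons.1 hiR').2
        have hr0x : r0 ≤ x := pv_head_le x r0 R' hR hxR
        have hix : i < x := hiR x hxR
        have hx0 : ¬ x = 0 := by omega
        have hx1 : ¬ x < i := by omega
        refine ⟨2 * (r0 - i + 2), ?_, ?_⟩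
        · simp [pvCand]
        · simp [pvDist, hx0, hx1, WEIGTH]
          omega

-- the loop of B sums A's inner values over any suffix of the nonzero list
theorem pv_altGo_sum (nz : List Int) (hpw : nz.Pairwise (· < ·)) (hnn : ∀ x ∈ nz, 0 ≤ x) :
    ∀ (s P : List Int), nz = P ++ s →
      pvAltGo nz.head? P.getLast? s
        = (s.map (fun i => ((nz.filter (fun j => !(j == i))).map (pvDist i)).foldl min 9999999)).sum := by
  intro s
  induction s with
  | nil => intro P h; simp [pvAltGo]
  | cons i rest ih =>
    intro P heq
    have heq' : nz = (P ++ [i]) ++ rest := by simp [heq]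
    have hstep := ih (P ++ [i]) heq'
    rw [List.getLast?_concat] at hstep
    have hfilter : nz.filter (fun j => !(j == i)) = P ++ rest := by
      subst heq
      rw [List.filter_append, List.filter_cons]
      have h1 : ∀ a ∈ P, a < i := by
        intro a ha
        exact (List.pairwise_append.1 hpw).2.2 a ha i (List.mem_cons_self ..)
      have h2 : ∀ a ∈ rest, i < a := by
        intro a ha
        exact (List.pairwise_cons.1 (List.pairwise_append.1 hpw).2.1).1 a ha
      have hP : P.filter (fun j => !(j == i)) = P :=
        List.filter_eq_self.2 (fun a ha => by have := h1 a ha; simp; omega)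
      have hR : rest.filter (fun j => !(j == i)) = rest :=
        List.filter_eq_self.2 (fun a ha => by have := h2 a ha; simp; omega)
      simp [hP, hR]
    have hbest : pvBestB nz.head? P.getLast? i rest.head?
        = ((nz.filter (fun j => !(j == i))).map (pvDist i)).foldl min 9999999 := by
      rw [hfilter]
      have h1 : (P ++ i :: rest).Pairwise (· < ·) := heq ▸ hpw
      have h2 : ∀ x ∈ P ++ i :: rest, 0 ≤ x := fun x hx => hnn x (heq ▸ hx)
      have h3 : nz.head? = (P ++ i :: rest).head? := by rw [heq]
      rw [h3]
      exact pv_best_eq_inner P rest i h1 h2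
    simp only [pvAltGo, List.map_cons, List.sum_cons, hbest, hstep]

-- ===== VERDICT (by name: the statement is the Claim_ definition above) =====
theorem diversidadePura_spec : Claim_equal_diversidadePura := by
  intro hist _
  unfold Spec_diversidadePura
  have hnz : ((PySem.List.enumerate hist 0).filter (fun p => !(p.2 == 0))).map (fun p => p.1)
      = pvNz hist := by
    rw [show PySem.List.enumerate hist = PySem.List.enumerate hist 0 from rfl,
      PySem.List.enumerate_eq_map_pyRange (d := 0), List.filter_map, List.map_map]
    simp only [Function.comp_def]
    simp [pvNz]
  have hpw : (pvNz hist).Pairwise (· < ·) :=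
    List.Pairwise.filter _ (PySem.List.pairwise_lt_pyRange_one 0 (PySem.List.len hist))
  have hnn : ∀ x ∈ pvNz hist, 0 ≤ x := by
    intro x hx
    have := List.mem_of_mem_filter hx
    exact ((PySem.List.mem_pyRange_one).1 this).1
  have hB : diversidadePura_alt hist
      = ((pvNz hist).map (pvInner hist)).sum := by
    show pvAltGo _ none _ = _
    rw [hnz]
    have := pv_altGo_sum (pvNz hist) hpw hnn (pvNz hist) [] rfl
    simpa [pvInner] using this
  have hA : diversidadePura hist = ((pvNz hist).map (pvInner hist)).sum := by
    show (PySem.List.pyRange 0 (PySem.List.len hist) 1).foldl _ 0 = _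
    have hbody : (fun summation i =>
        if PySem.List.pyGetD hist i 0 = 0 then summation
        else
          summation + (PySem.List.pyRange 0 (PySem.List.len hist) 1).foldl (fun minimun j =>
            if PySem.List.pyGetD hist j 0 = 0 then minimun
            else if j = i then minimun
            else
              let distance := if j = 0 then WEIGTH*((j - i) + 1)
                else if j < i then WEIGTH*((i - j) + 2)
                else WEIGTH*((j - i) + 2)
              if distance < minimun then distance else minimun) 9999999)
        = (fun summation i =>
          if PySem.List.pyGetD hist i 0 = 0 then summation
          else summation + pvInner hist i) := by
      funext s i
      rw [pv_inner_body_eq hist i, pv_inner_fold hist i]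
      rfl
    rw [hbody, pv_outer_fold]
    simp [pvNz]
  rw [hA, hB]
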